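-- pv_equiv track=rewrite | github.com/callumjd/timber | timber/md_functions.py | check_ligand_naming
-- ===== SOURCE A (Python) =====
-- def check_ligand_naming(name_list):
--
--     output=True
--     for name in name_list:
--         if ' ' in name:
--             output=False
--             break
--         elif '~' in name:
--             output=False
--             break
--         elif len(name_list)!=len(set(name_list)):
--             output=False
--             break
--
--     return output
-- ===== SOURCE B (Python) =====
-- def check_ligand_naming(name_list):
--     prev = None
--     for name in sorted(name_list):
--         if ' ' in name or '~' in name:
--             return False
--         if name == prev:
--             return False
--         prev = name
--     return True
-- ===== Notes on version B (the rewrite author's own statement) =====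
-- stated objective: alternative
-- what changed: Replaces A's per-iteration set()-length duplicate test inside the loop with a sort-then-single-scan: names are checked in sorted order and a duplicate is detected by equality with the immediately preceding name.
import Mathlib
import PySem

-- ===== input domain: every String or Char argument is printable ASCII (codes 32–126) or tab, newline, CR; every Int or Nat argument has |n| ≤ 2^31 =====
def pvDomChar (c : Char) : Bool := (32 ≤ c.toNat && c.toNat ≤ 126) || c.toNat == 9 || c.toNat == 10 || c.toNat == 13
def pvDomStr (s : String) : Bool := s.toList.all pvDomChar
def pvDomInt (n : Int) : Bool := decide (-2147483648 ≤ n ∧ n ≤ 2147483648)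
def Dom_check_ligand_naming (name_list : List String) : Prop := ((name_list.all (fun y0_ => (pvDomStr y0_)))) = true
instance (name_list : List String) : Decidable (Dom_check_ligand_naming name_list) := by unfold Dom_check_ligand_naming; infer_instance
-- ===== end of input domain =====

-- B replaces A's per-iteration set() rebuild with a sort-then-adjacent-scan for duplicates (return value only; neither mutates its argument).


-- ===== PORT A =====
-- loop 'for name in name_list' with break; 'full' is the whole name_list, checked by the set()-length test each iteration
def check_ligand_naming_goA (full : List String) : List String → Bool
  | [] => true
  | name :: rest =>
    if PySem.Str.isIn " " name then false
    else if PySem.Str.isIn "~" name then false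
    else if full.length ≠ (PySem.Set.ofList full).length then false
    else check_ligand_naming_goA full rest

def check_ligand_naming (name_list : List String) : Bool :=
  check_ligand_naming_goA name_list name_list

-- ===== PORT B =====
-- loop 'for name in sorted(name_list)' carrying prev (initially None)
def check_ligand_naming_goB : Option String → List String → Bool
  | _, [] => true
  | prev, name :: rest =>
    if PySem.Str.isIn " " name || PySem.Str.isIn "~" name then false
    else if some name == prev then false
    else check_ligand_naming_goB (some name) rest

def check_ligand_naming_alt (name_list : List String) : Bool :=
  check_ligand_naming_goB none (PySem.List.sorted name_list (fun x => x) false)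

-- ===== PRECONDITION & SPEC =====
def Spec_check_ligand_naming (name_list : List String) (out : Bool) : Prop := out = check_ligand_naming_alt name_list
instance (name_list : List String) (out : Bool) : Decidable (Spec_check_ligand_naming name_list out) := by unfold Spec_check_ligand_naming; infer_instance

-- ===== CLAIM (what is proved, stated in full; the proofs are below) =====
def Claim_equal_check_ligand_naming : Prop := ∀ (name_list : List String), Dom_check_ligand_naming name_list → Spec_check_ligand_naming name_list (check_ligand_naming name_list)

-- ===== LEMMAS AND PROOFS =====

-- a name is clean iff it contains neither ' ' nor '~'
def pvClean (n : String) : Prop := PySem.Str.isIn " " n = false ∧ PySem.Str.isIn "~" n = false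

lemma goA_iff (full rem : List String) :
    check_ligand_naming_goA full rem = true ↔
      ∀ n ∈ rem, pvClean n ∧ full.length = (PySem.Set.ofList full).length := by
  induction rem with
  | nil => simp [check_ligand_naming_goA]
  | cons name rest ih =>
    simp only [check_ligand_naming_goA, List.mem_cons]
    split_ifs with h1 h2 h3
    · constructor
      · intro h; exact absurd h (by simp)
      · intro h
        have hc := (h name (Or.inl rfl)).1.1
        rw [hc] at h1; exact absurd h1 (by simp)
    · constructor
      · intro h; exact absurd h (by simp)
      · intro h
        have hc := (h name (Or.inl rfl)).1.2
        rw [hc] at h2; exact absurd h2 (by simp)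
    · constructor
      · intro h; exact absurd h (by simp)
      · intro h
        exact absurd (h name (Or.inl rfl)).2 h3
    · rw [ih]
      simp only [Bool.not_eq_true] at h1 h2
      constructor
      · intro h n hn
        rcases hn with rfl | hn
        · exact ⟨⟨h1, h2⟩, by omega⟩
        · exact h n hn
      · intro h n hn; exact h n (Or.inr hn)

lemma goB_iff (prev : Option String) (rem : List String) :
    check_ligand_naming_goB prev rem = true ↔
      (∀ n ∈ rem, pvClean n) ∧ List.IsChain (fun a b => a ≠ b) (prev.toList ++ rem) := by
  induction rem generalizing prev with
  | nil =>
    cases prev <;> simp [check_ligand_naming_goB]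
  | cons name rest ih =>
    simp only [check_ligand_naming_goB]
    split_ifs with h1 h2
    · constructor
      · intro h; exact absurd h (by simp)
      · rintro ⟨hall, -⟩
        have hc := hall name (by simp)
        rw [hc.1, hc.2] at h1; exact absurd h1 (by simp)
    · -- name equals prev: the sorted scan found an adjacent duplicate
      constructor
      · intro h; exact absurd h (by simp)
      · rintro ⟨-, hch⟩
        have hprev : prev = some name := by
          cases prev with
          | none => exact absurd h2 (by simp)
          | some p => simp only [Option.some.injEq, beq_iff_eq] at h2; rw [h2]
        subst hprev
        exact (List.isChain_cons_cons.mp hch).1 rfl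
    · rw [ih]
      have hclean : pvClean name := by
        simp only [Bool.or_eq_true, not_or, Bool.not_eq_true] at h1
        exact ⟨h1.1, h1.2⟩
      cases prev with
      | none =>
        simp only [Option.toList_none, List.nil_append, Option.toList_some,
          List.singleton_append, List.mem_cons]
        constructor
        · rintro ⟨hall, hch⟩
          exact ⟨fun n hn => by rcases hn with rfl | hn; exacts [hclean, hall n hn], hch⟩
        · rintro ⟨hall, hch⟩
          exact ⟨fun n hn => hall n (Or.inr hn), hch⟩
      | some p =>
        have hpn : name ≠ p := by
          intro h; apply h2; rw [h]; exact beq_self_eq_true _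
        simp only [Option.toList_some, List.singleton_append, List.isChain_cons_cons,
          List.mem_cons]
        constructor
        · rintro ⟨hall, hch⟩
          exact ⟨fun n hn => by rcases hn with rfl | hn; exacts [hclean, hall n hn],
            Ne.symm hpn, hch⟩
        · rintro ⟨hall, -, hch⟩
          exact ⟨fun n hn => hall n (Or.inr hn), hch⟩

-- PySem.Set.ofList l is a sublist of l (it keeps first occurrences, in order)
lemma pv_discard_sublist (s : List String) (x : String) : List.Sublist (PySem.Set.discard s x) s := by
  simp only [PySem.Set.discard]
  exact List.filter_sublist

lemma pv_ofList_sublist (l : List String) : List.Sublist (PySem.Set.ofList l) l := by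
  induction l with
  | nil => exact List.Sublist.refl _
  | cons x xs ih =>
    rw [PySem.Set.ofList_cons]
    exact List.Sublist.cons₂ x ((pv_discard_sublist _ _).trans ih)

lemma pv_len_iff_nodup (l : List String) :
    l.length = (PySem.Set.ofList l).length ↔ l.Nodup := by
  constructor
  · intro h
    have heq : PySem.Set.ofList l = l := (pv_ofList_sublist l).eq_of_length h.symm
    rw [← heq]; exact PySem.Set.nodup_ofList l
  · intro h
    rw [PySem.Set.ofList_eq_self_of_nodup l h]

-- in a ≤-sorted list, no two adjacent elements equal ⇒ no duplicates at all
lemma pv_nodup_of_sorted_chain_ne (l : List String)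
    (hs : l.Pairwise (fun a b => a ≤ b)) (hc : l.IsChain (fun a b => a ≠ b)) : l.Nodup := by
  induction l with
  | nil => simp
  | cons a t ih =>
    have hale := (List.pairwise_cons.mp hs).1
    have hst := (List.pairwise_cons.mp hs).2
    refine List.nodup_cons.mpr ⟨?_, ih hst hc.tail⟩
    intro hmem
    cases t with
    | nil => exact absurd hmem (by simp)
    | cons b t' =>
      have hab : a ≠ b := (List.isChain_cons_cons.mp hc).1
      rcases List.mem_cons.mp hmem with rfl | hmem'
      · exact hab rfl
      · have hba : b ≤ a := (List.pairwise_cons.mp hst).1 a hmem'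
        have hab' : a ≤ b := hale b (by simp)
        exact hab (le_antisymm hab' hba)

lemma pv_A_iff (l : List String) :
    check_ligand_naming l = true ↔ (∀ n ∈ l, pvClean n) ∧ l.Nodup := by
  rw [check_ligand_naming, goA_iff]
  constructor
  · intro h
    refine ⟨fun n hn => (h n hn).1, ?_⟩
    cases l with
    | nil => simp
    | cons a t => exact (pv_len_iff_nodup _).mp (h a (by simp)).2
  · rintro ⟨hall, hnd⟩ n hn
    exact ⟨hall n hn, (pv_len_iff_nodup l).mpr hnd⟩

lemma pv_B_iff (l : List String) :
    check_ligand_naming_alt l = true ↔ (∀ n ∈ l, pvClean n) ∧ l.Nodup := by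
  rw [check_ligand_naming_alt, goB_iff]
  simp only [Option.toList_none, List.nil_append]
  have hperm : (PySem.List.sorted l (fun x => x) false).Perm l := PySem.List.sorted_perm l _ _
  have hpw : (PySem.List.sorted l (fun x => x) false).Pairwise (fun a b => a ≤ b) :=
    PySem.List.sorted_pairwise l _
  constructor
  · rintro ⟨hall, hch⟩
    refine ⟨fun n hn => hall n (hperm.mem_iff.mpr hn), ?_⟩
    exact hperm.nodup_iff.mp (pv_nodup_of_sorted_chain_ne _ hpw hch)
  · rintro ⟨hall, hnd⟩
    refine ⟨fun n hn => hall n (hperm.mem_iff.mp hn), ?_⟩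
    exact List.Pairwise.isChain (hperm.nodup_iff.mpr hnd)

-- ===== VERDICT (by name: the statement is the Claim_ definition above) =====
theorem check_ligand_naming_spec : Claim_equal_check_ligand_naming := by
  intro l _
  unfold Spec_check_ligand_naming
  rw [Bool.eq_iff_iff, pv_A_iff, pv_B_iff]
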